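-- pv_equiv track=rewrite | github.com/gouravshaw2014/Automaton-Tools | SAFA/safa.py | convert
-- ===== SOURCE A (Python) =====
-- from collections import deque, defaultdict
--
-- def convert(T):
--     grouped = defaultdict(set)
--
--     for state, symbol, condition, next_states in T:
--         key = (state, symbol, condition)
--         grouped[key].update(next_states)
--
--     St = defaultdict(list)
--     for (state, symbol, condition), targets in grouped.items():
--         St[(state, symbol)].append((condition, targets))
--
--     # Optional: convert lists to tuples for consistent format
--     for key in St:
--         St[key] = tuple(St[key])
--
--     return dict(St)
-- ===== SOURCE B (Python) =====
-- def convert(T):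
--     St = {}
--     for state, symbol, condition, next_states in T:
--         inner = St.setdefault((state, symbol), {})
--         inner.setdefault(condition, set()).update(next_states)
--     return {key: tuple(inner.items()) for key, inner in St.items()}
-- ===== Notes on version B (the rewrite author's own statement) =====
-- stated objective: simpler
-- what changed: Replaces A's two-stage aggregate-by-triple-then-regroup-by-pair (two dict passes plus a tuple-conversion pass) with a single pass that builds a nested dict St[(state,symbol)][condition] directly and converts each inner dict to a tuple of items at the end.
import Mathlib
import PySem

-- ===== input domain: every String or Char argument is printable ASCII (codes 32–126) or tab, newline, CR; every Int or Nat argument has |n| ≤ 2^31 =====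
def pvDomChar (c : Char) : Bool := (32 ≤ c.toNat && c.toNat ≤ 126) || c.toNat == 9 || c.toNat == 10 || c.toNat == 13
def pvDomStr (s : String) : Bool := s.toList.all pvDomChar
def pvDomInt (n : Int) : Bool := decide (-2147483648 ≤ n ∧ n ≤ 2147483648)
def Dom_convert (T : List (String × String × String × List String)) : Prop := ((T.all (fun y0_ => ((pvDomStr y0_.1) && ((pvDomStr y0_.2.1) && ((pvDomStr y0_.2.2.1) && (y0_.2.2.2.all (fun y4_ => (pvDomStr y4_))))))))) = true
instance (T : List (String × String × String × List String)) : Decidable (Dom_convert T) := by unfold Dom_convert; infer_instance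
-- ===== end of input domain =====

-- B builds the nested dict St[(state,symbol)][condition] in ONE pass instead of A's aggregate-by-triple-then-regroup; return values only (neither version mutates its argument).

-- ===== PORT A =====
-- A: grouped = defaultdict(set) keyed by (state,symbol,condition); then regroup into St keyed
-- by (state,symbol); then the tuple()-conversion loop (tuple ≙ List in this model); then dict(St).
def convert (T : List (String × String × String × List String)) : List (String × String × List (String × List String)) :=
  let grouped : PySem.Dict (String × String × String) (PySem.Set String) :=
    T.foldl (fun d r =>
      d.modify (r.1, r.2.1, r.2.2.1) PySem.Set.empty (fun s => PySem.Set.update s r.2.2.2))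
      PySem.Dict.empty
  let St : PySem.Dict (String × String) (List (String × PySem.Set String)) :=
    grouped.items.foldl (fun d p =>
      d.modify (p.1.1, p.1.2.1) [] (fun l => l ++ [(p.1.2.2, p.2)]))
      PySem.Dict.empty
  -- 'for key in St: St[key] = tuple(St[key])' — tuple() on a list is the identity in this model
  let St2 := St.keys.foldl (fun d k => d.insert k (d.getD k [])) St
  St2.items.map (fun p => (p.1.1, p.1.2, p.2))

-- ===== PORT B =====
-- B: one pass, St.setdefault((state,symbol),{}).setdefault(condition,set()).update(next_states),
-- then each (state,symbol)'s inner dict is flattened to its items list.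
def convert_alt (T : List (String × String × String × List String)) : List (String × String × List (String × List String)) :=
  let St : PySem.Dict (String × String) (PySem.Dict String (PySem.Set String)) :=
    T.foldl (fun d r =>
      d.modify (r.1, r.2.1) PySem.Dict.empty
        (fun inner => inner.modify r.2.2.1 PySem.Set.empty (fun s => PySem.Set.update s r.2.2.2)))
      PySem.Dict.empty
  St.items.map (fun p => (p.1.1, p.1.2, p.2.items))

-- ===== PRECONDITION & SPEC =====
def Spec_convert (T : List (String × String × String × List String)) (out : List (String × String × List (String × List String))) : Prop := out = convert_alt T
instance (T : List (String × String × String × List String)) (out : List (String × String × List (String × List String))) : Decidable (Spec_convert T out) := by unfold Spec_convert; infer_instance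

-- ===== CLAIM (what is proved, stated in full; the proofs are below) =====
def Claim_equal_convert : Prop := ∀ (T : List (String × String × String × List String)), Dom_convert T → Spec_convert T (convert T)

-- ===== LEMMAS AND PROOFS =====
theorem dict_getD_foldl_modify {α κ ν : Type} [BEq κ] [LawfulBEq κ] [DecidableEq κ]
    (l : List α) (key : α → κ) (dflt : ν) (step : ν → α → ν) (d : PySem.Dict κ ν) (q : κ) :
    (l.foldl (fun d r => d.modify (key r) dflt (fun v => step v r)) d).getD q dflt
      = (l.filter (fun r => key r == q)).foldl step (d.getD q dflt) := by
  induction l generalizing d with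
  | nil => rfl
  | cons a l ih =>
    simp only [List.foldl_cons, List.filter_cons]
    rw [ih, PySem.Dict.getD_modify]
    by_cases h : q = key a
    · rw [if_pos h, ← h]
      simp
    · rw [if_neg h]
      have hb : (key a == q) = false := beq_eq_false_iff_ne.2 (Ne.symm h)
      simp [hb]

theorem set_update_foldl {α σ : Type} [BEq σ] (l : List α) (ns : α → List σ) (s : PySem.Set σ) :
    l.foldl (fun s r => PySem.Set.update s (ns r)) s = PySem.Set.update s (l.flatMap ns) := by
  simp [PySem.Set.update, List.foldl_flatMap]

-- ============ proof-side structure defs ============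
def rowPr (r : String × String × String × List String) : String × String := (r.1, r.2.1)
def rowTri (r : String × String × String × List String) : String × String × String := (r.1, r.2.1, r.2.2.1)
def valOf (T : List (String × String × String × List String)) (k : String × String × String) : PySem.Set String :=
  PySem.Set.update PySem.Set.empty ((T.filter (fun r => rowTri r == k)).flatMap (fun r => r.2.2.2))
def condsOf (T : List (String × String × String × List String)) (q : String × String) : List String :=
  PySem.Set.ofList ((T.filter (fun r => rowPr r == q)).map (fun r => r.2.2.1))
def outSpec (T : List (String × String × String × List String)) : List (String × String × List (String × List String)) :=
  (PySem.Set.ofList (T.map rowPr)).map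
    (fun q => (q.1, q.2, (condsOf T q).map (fun c => (c, valOf T (q.1, q.2, c)))))

def innerFold (l : List (String × String × String × List String)) : PySem.Dict String (PySem.Set String) :=
  l.foldl (fun inn r => inn.modify r.2.2.1 PySem.Set.empty (fun s => PySem.Set.update s r.2.2.2)) PySem.Dict.empty
def bFold (T : List (String × String × String × List String)) : PySem.Dict (String × String) (PySem.Dict String (PySem.Set String)) :=
  T.foldl (fun d r => d.modify (r.1, r.2.1) PySem.Dict.empty
    (fun inner => inner.modify r.2.2.1 PySem.Set.empty (fun s => PySem.Set.update s r.2.2.2))) PySem.Dict.empty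

-- inner dict of B at q: keys / values / items
theorem innerFold_keys (l : List (String × String × String × List String)) :
    (innerFold l).keys = PySem.Set.ofList (l.map (fun r => r.2.2.1)) :=
  PySem.Dict.keys_foldl_modify_key l (fun r => r.2.2.1) PySem.Set.empty
    (fun _ r => fun s => PySem.Set.update s r.2.2.2) PySem.Dict.empty

theorem innerFold_nodup (l : List (String × String × String × List String)) :
    (innerFold l).keys.Nodup :=
  PySem.Dict.nodup_keys_foldl_modify_key l (fun r => r.2.2.1) PySem.Set.empty
    (fun _ r => fun s => PySem.Set.update s r.2.2.2) PySem.Dict.empty List.nodup_nil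

theorem innerFold_getD (l : List (String × String × String × List String)) (c : String) :
    (innerFold l).getD c PySem.Set.empty
      = PySem.Set.update PySem.Set.empty ((l.filter (fun r => r.2.2.1 == c)).flatMap (fun r => r.2.2.2)) :=
  (dict_getD_foldl_modify l (fun r => r.2.2.1) PySem.Set.empty
      (fun s r => PySem.Set.update s r.2.2.2) PySem.Dict.empty c).trans
    (set_update_foldl (l.filter (fun r => r.2.2.1 == c)) (fun r => r.2.2.2) _)

theorem bFold_keys (T : List (String × String × String × List String)) :
    (bFold T).keys = PySem.Set.ofList (T.map rowPr) :=
  PySem.Dict.keys_foldl_modify_key T rowPr PySem.Dict.empty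
    (fun _ r inner => inner.modify r.2.2.1 PySem.Set.empty (fun s => PySem.Set.update s r.2.2.2)) PySem.Dict.empty

theorem bFold_nodup (T : List (String × String × String × List String)) :
    (bFold T).keys.Nodup :=
  PySem.Dict.nodup_keys_foldl_modify_key T rowPr PySem.Dict.empty
    (fun _ r inner => inner.modify r.2.2.1 PySem.Set.empty (fun s => PySem.Set.update s r.2.2.2)) PySem.Dict.empty List.nodup_nil

theorem bFold_getD (T : List (String × String × String × List String)) (q : String × String) :
    (bFold T).getD q PySem.Dict.empty = innerFold (T.filter (fun r => rowPr r == q)) :=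
  dict_getD_foldl_modify T rowPr PySem.Dict.empty
    (fun inner r => inner.modify r.2.2.1 PySem.Set.empty (fun s => PySem.Set.update s r.2.2.2)) PySem.Dict.empty q

theorem beq_merge (r : String × String × String × List String) (q : String × String) (c : String) :
    ((r.2.2.1 == c) && (rowPr r == q)) = (rowTri r == (q.1, q.2, c)) := by
  rw [Bool.eq_iff_iff]
  simp [rowPr, rowTri, Prod.ext_iff]
  tauto

theorem convertAlt_eq_outSpec (T : List (String × String × String × List String)) :
    convert_alt T = outSpec T := by
  have h1 : convert_alt T = (bFold T).items.map (fun p => (p.1.1, p.1.2, p.2.items)) := rfl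
  rw [h1, PySem.Dict.items_eq_map_keys (bFold T) (bFold_nodup T) PySem.Dict.empty,
    List.map_map, bFold_keys]
  unfold outSpec
  apply List.map_congr_left
  intro q hq
  simp only [Function.comp]
  rw [bFold_getD, PySem.Dict.items_eq_map_keys _ (innerFold_nodup _) PySem.Set.empty,
    innerFold_keys]
  have hc : PySem.Set.ofList ((T.filter (fun r => rowPr r == q)).map (fun r => r.2.2.1)) = condsOf T q := rfl
  rw [hc]
  have hv : ∀ c ∈ condsOf T q,
      (c, (innerFold (T.filter (fun r => rowPr r == q))).getD c PySem.Set.empty)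
        = (c, valOf T (q.1, q.2, c)) := by
    intro c _
    rw [innerFold_getD, List.filter_filter]
    have : (fun r => (r.2.2.1 == c) && (rowPr r == q)) = (fun r => rowTri r == (q.1, q.2, c)) :=
      funext (fun r => beq_merge r q c)
    rw [this]
    rfl
  rw [List.map_congr_left hv]

def gFold (T : List (String × String × String × List String)) : PySem.Dict (String × String × String) (PySem.Set String) :=
  T.foldl (fun d r => d.modify (r.1, r.2.1, r.2.2.1) PySem.Set.empty (fun s => PySem.Set.update s r.2.2.2)) PySem.Dict.empty
def aFold (L : List ((String × String × String) × PySem.Set String)) : PySem.Dict (String × String) (List (String × PySem.Set String)) :=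
  L.foldl (fun d p => d.modify (p.1.1, p.1.2.1) [] (fun l => l ++ [(p.1.2.2, p.2)])) PySem.Dict.empty

theorem gFold_keys (T : List (String × String × String × List String)) :
    (gFold T).keys = PySem.Set.ofList (T.map rowTri) :=
  PySem.Dict.keys_foldl_modify_key T rowTri PySem.Set.empty
    (fun _ r s => PySem.Set.update s r.2.2.2) PySem.Dict.empty

theorem gFold_nodup (T : List (String × String × String × List String)) :
    (gFold T).keys.Nodup :=
  PySem.Dict.nodup_keys_foldl_modify_key T rowTri PySem.Set.empty
    (fun _ r s => PySem.Set.update s r.2.2.2) PySem.Dict.empty List.nodup_nil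

theorem gFold_getD (T : List (String × String × String × List String)) (k : String × String × String) :
    (gFold T).getD k PySem.Set.empty = valOf T k :=
  (dict_getD_foldl_modify T rowTri PySem.Set.empty
      (fun s r => PySem.Set.update s r.2.2.2) PySem.Dict.empty k).trans
    (set_update_foldl (T.filter (fun r => rowTri r == k)) (fun r => r.2.2.2) _)

theorem gFold_items (T : List (String × String × String × List String)) :
    (gFold T).items = (PySem.Set.ofList (T.map rowTri)).map (fun k => (k, valOf T k)) := by
  rw [PySem.Dict.items_eq_map_keys _ (gFold_nodup T) PySem.Set.empty, gFold_keys]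
  exact List.map_congr_left (fun k _ => by rw [gFold_getD])

theorem aFold_keys (L : List ((String × String × String) × PySem.Set String)) :
    (aFold L).keys = PySem.Set.ofList (L.map (fun p => (p.1.1, p.1.2.1))) :=
  PySem.Dict.keys_foldl_modify_key L (fun p => (p.1.1, p.1.2.1)) []
    (fun _ p l => l ++ [(p.1.2.2, p.2)]) PySem.Dict.empty

theorem aFold_nodup (L : List ((String × String × String) × PySem.Set String)) :
    (aFold L).keys.Nodup :=
  PySem.Dict.nodup_keys_foldl_modify_key L (fun p => (p.1.1, p.1.2.1)) []
    (fun _ p l => l ++ [(p.1.2.2, p.2)]) PySem.Dict.empty List.nodup_nil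

theorem aFold_getD (L : List ((String × String × String) × PySem.Set String)) (q : String × String) :
    (aFold L).getD q []
      = ((L.map (fun p => ((p.1.1, p.1.2.1), (p.1.2.2, p.2)))).filter (fun x => x.1 == q)).map (fun x => x.2) := by
  have h := PySem.Dict.getD_foldl_modify_append
    (L.map (fun p => ((p.1.1, p.1.2.1), (p.1.2.2, p.2)))) PySem.Dict.empty q
  rw [List.foldl_map] at h
  exact h

theorem ofList_append_singleton {α : Type} [BEq α] (l : List α) (a : α) :
    PySem.Set.ofList (l ++ [a]) = PySem.Set.add (PySem.Set.ofList l) a := by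
  simp [PySem.Set.ofList_eq_foldl, List.foldl_append]

theorem set_add_of_mem {α : Type} [BEq α] [LawfulBEq α] (s : PySem.Set α) (a : α) (h : a ∈ s) :
    PySem.Set.add s a = s := by
  simp [PySem.Set.add, PySem.Set.contains, h]

theorem set_add_of_not_mem {α : Type} [BEq α] [LawfulBEq α] (s : PySem.Set α) (a : α) (h : ¬ a ∈ s) :
    PySem.Set.add s a = s ++ [a] := by
  simp [PySem.Set.add, PySem.Set.contains, h]

theorem ofList_map_ofList {α β : Type} [BEq α] [LawfulBEq α] [BEq β] [LawfulBEq β]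
    (l : List α) (f : α → β) :
    PySem.Set.ofList ((PySem.Set.ofList l).map f) = PySem.Set.ofList (l.map f) := by
  induction l using List.reverseRecOn with
  | nil => rfl
  | append_singleton l a ih =>
    rw [ofList_append_singleton, List.map_append, List.map_singleton, ofList_append_singleton]
    by_cases h : a ∈ PySem.Set.ofList l
    · rw [set_add_of_mem _ _ h, ih]
      have : f a ∈ PySem.Set.ofList (l.map f) := by
        rw [PySem.Set.mem_ofList]
        exact List.mem_map.2 ⟨a, (PySem.Set.mem_ofList l a).1 h, rfl⟩
      rw [set_add_of_mem _ _ this]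
    · rw [set_add_of_not_mem _ _ h, List.map_append, List.map_singleton,
        ofList_append_singleton, ih]

theorem ofList_filter_map {α β : Type} [BEq α] [LawfulBEq α] [BEq β] [LawfulBEq β]
    (L : List α) (P : α → Bool) (g : α → β)
    (inj : ∀ a b, P a = true → P b = true → g a = g b → a = b) :
    ((PySem.Set.ofList L).filter P).map g = PySem.Set.ofList ((L.filter P).map g) := by
  induction L using List.reverseRecOn with
  | nil => rfl
  | append_singleton L a ih =>
    rw [ofList_append_singleton, List.filter_append, List.map_append]
    by_cases h : a ∈ PySem.Set.ofList L
    · rw [set_add_of_mem _ _ h, ih]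
      by_cases hp : P a
      · have hmem : g a ∈ PySem.Set.ofList ((L.filter P).map g) := by
          rw [PySem.Set.mem_ofList]
          exact List.mem_map.2 ⟨a, List.mem_filter.2 ⟨(PySem.Set.mem_ofList L a).1 h, hp⟩, rfl⟩
        simp [hp, ofList_append_singleton, set_add_of_mem _ _ hmem]
      · simp [hp]
    · rw [set_add_of_not_mem _ _ h, List.filter_append, List.map_append, ih]
      by_cases hp : P a
      · have hmem : g a ∉ PySem.Set.ofList ((L.filter P).map g) := by
          rw [PySem.Set.mem_ofList]
          intro hm
          obtain ⟨b, hb, hgb⟩ := List.mem_map.1 hm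
          obtain ⟨hbL, hPb⟩ := List.mem_filter.1 hb
          exact h ((PySem.Set.mem_ofList L a).2 ((inj b a hPb hp hgb) ▸ hbL))
        simp [hp, ofList_append_singleton, set_add_of_not_mem _ _ hmem]
      · simp [hp]

theorem insert_getD_self {κ ν : Type} [BEq κ] [LawfulBEq κ] (d : PySem.Dict κ ν) (k : κ) (dflt : ν)
    (hnd : d.keys.Nodup) (hc : d.contains k = true) : d.insert k (d.getD k dflt) = d := by
  apply PySem.Dict.ext
  rw [PySem.Dict.items_insert_of_contains d _ hc]
  have h : ∀ p ∈ d.items, (if (p.1 == k) = true then (k, d.getD k dflt) else p) = p := by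
    intro p hp
    by_cases h : p.1 = k
    · subst h
      have hp' : (p.1, p.2) ∈ d.items := by simpa using hp
      have := PySem.Dict.getD_of_mem_items d hp' hnd dflt
      simp [this]
    · simp [h]
  rw [List.map_congr_left h, List.map_id']

theorem foldl_insert_getD_id {κ ν : Type} [BEq κ] [LawfulBEq κ] (ks : List κ)
    (d : PySem.Dict κ ν) (dflt : ν) (hnd : d.keys.Nodup) :
    (∀ k ∈ ks, d.contains k = true) →
    ks.foldl (fun d k => d.insert k (d.getD k dflt)) d = d := by
  induction ks with
  | nil => intro _; rfl
  | cons a ks ih =>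
    intro h
    simp only [List.foldl_cons]
    rw [insert_getD_self d a dflt hnd (h a (by simp))]
    exact ih (fun k hk => h k (by simp [hk]))

theorem tri_inj (q : String × String) : ∀ (a b : String × String × String),
    ((a.1, a.2.1) == q) = true → ((b.1, b.2.1) == q) = true → a.2.2 = b.2.2 → a = b := by
  rintro ⟨a1, a2, a3⟩ ⟨b1, b2, b3⟩ ha hb h3
  simp only [beq_iff_eq, Prod.ext_iff] at ha hb ⊢
  obtain ⟨ha1, ha2⟩ := Prod.mk.injEq .. ▸ ha
  exact ⟨by simp_all, by simp_all, h3⟩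

theorem convert_eq_outSpec (T : List (String × String × String × List String)) :
    convert T = outSpec T := by
  have h0 : convert T
      = ((aFold (gFold T).items).keys.foldl (fun d k => d.insert k (d.getD k []))
          (aFold (gFold T).items)).items.map (fun p => (p.1.1, p.1.2, p.2)) := rfl
  rw [h0, foldl_insert_getD_id _ _ [] (aFold_nodup _)
      (fun k hk => (PySem.Dict.contains_iff_mem_keys _ k).2 hk),
    PySem.Dict.items_eq_map_keys _ (aFold_nodup _) [], List.map_map,
    aFold_keys, gFold_items, List.map_map]
  have hf : ((fun p : (String × String × String) × PySem.Set String => (p.1.1, p.1.2.1))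
      ∘ (fun k => (k, valOf T k))) = (fun k : String × String × String => (k.1, k.2.1)) := rfl
  rw [hf, ofList_map_ofList, List.map_map]
  have hf2 : ((fun k : String × String × String => (k.1, k.2.1)) ∘ rowTri) = rowPr := rfl
  rw [hf2]
  unfold outSpec
  apply List.map_congr_left
  intro q hq
  simp only [Function.comp]
  rw [aFold_getD, List.map_map]
  have hf3 : ((fun p : (String × String × String) × PySem.Set String => ((p.1.1, p.1.2.1), (p.1.2.2, p.2)))
      ∘ (fun k => (k, valOf T k)))
      = (fun k : String × String × String => ((k.1, k.2.1), (k.2.2, valOf T k))) := rfl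
  rw [hf3, List.filter_map, List.map_map]
  have hf4 : ((fun x : (String × String) × (String × PySem.Set String) => x.1 == q)
      ∘ (fun k : String × String × String => ((k.1, k.2.1), (k.2.2, valOf T k))))
      = (fun k : String × String × String => (k.1, k.2.1) == q) := rfl
  have hf5 : ((fun x : (String × String) × (String × PySem.Set String) => x.2)
      ∘ (fun k : String × String × String => ((k.1, k.2.1), (k.2.2, valOf T k))))
      = (fun k : String × String × String => (k.2.2, valOf T k)) := rfl
  rw [hf4, hf5]
  have hptw : ∀ k ∈ (PySem.Set.ofList (T.map rowTri)).filter (fun k => (k.1, k.2.1) == q),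
      (fun k : String × String × String => (k.2.2, valOf T k)) k
        = ((fun c => (c, valOf T (q.1, q.2, c))) ∘ (fun k : String × String × String => k.2.2)) k := by
    intro k hk
    have h1 := (List.mem_filter.1 hk).2
    obtain ⟨k1, k2, k3⟩ := k
    have h2 : (k1, k2) = q := by simpa using h1
    obtain ⟨q1, q2⟩ := q
    obtain ⟨rfl, rfl⟩ : k1 = q1 ∧ k2 = q2 := by simpa [Prod.ext_iff] using h2
    rfl
  rw [List.map_congr_left hptw, ← List.map_map]
  have hcond : ((PySem.Set.ofList (T.map rowTri)).filter (fun k => (k.1, k.2.1) == q)).map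
      (fun k : String × String × String => k.2.2) = condsOf T q := by
    rw [ofList_filter_map (T.map rowTri) (fun k => (k.1, k.2.1) == q)
        (fun k : String × String × String => k.2.2) (tri_inj q)]
    rw [List.filter_map, List.map_map]
    rfl
  rw [hcond]

-- ===== VERDICT (by name: the statement is the Claim_ definition above) =====
theorem convert_spec : Claim_equal_convert := by
  intro T _
  unfold Spec_convert
  rw [convert_eq_outSpec, convertAlt_eq_outSpec]
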